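-- pv_equiv track=rewrite | github.com/bgr36/Studia | Ts/CSMA_CD/test2.py | aktualizuj_medium
-- ===== SOURCE A (Python) =====
-- DLUGOSC = 15
--
-- STACJE = {'A': 0, 'B': 7, 'C': 14}
--
-- def aktualizuj_medium(medium, stacje, aktywne_sygnaly):
--     nowe = ['_'] * DLUGOSC
--     warstwy = [[] for _ in range(DLUGOSC)]
--
--     for i, (pos, symbol) in enumerate(aktywne_sygnaly):
--         warstwy[pos].append(symbol)
--
--     for i in range(DLUGOSC):
--         if 'J' in warstwy[i]:
--             nowe[i] = 'J'
--         elif len(warstwy[i]) == 0: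
--             nowe[i] = '_' if i not in STACJE.values() else medium[i]
--         elif len(set(warstwy[i])) == 1:
--             nowe[i] = warstwy[i][0]
--         else:
--             nowe[i] = 'X'
--
--     # Umieść stacje
--     for st in STACJE:
--         nowe[STACJE[st]] = st
--
--     return nowe
-- ===== SOURCE B (Python) =====
-- DLUGOSC = 15
--
-- STACJE = {'A': 0, 'B': 7, 'C': 14}
--
-- def aktualizuj_medium(medium, stacje, aktywne_sygnaly):
--     # Online state machine: merge each signal directly into its cell in one pass.
--     # None = no signal yet; 'J' is absorbing (jam); a differing symbol turns the
--     # cell into the conflict marker 'X', which then persists (only 'J' overrides it).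
--     stan = [None] * DLUGOSC
--     for pos, sym in aktywne_sygnaly:
--         s = stan[pos]
--         if sym == 'J' or s == 'J':
--             stan[pos] = 'J'
--         elif s is None or s == sym:
--             stan[pos] = sym
--         else:
--             stan[pos] = 'X'
--     nowe = [s if s is not None else '_' for s in stan]
--     # idle station cells retain the medium contents, as in A, before the stamp
--     for p in STACJE.values():
--         if stan[p] is None:
--             nowe[p] = medium[p]
--     for st, p in STACJE.items():
--         nowe[p] = st
--     return nowe
-- ===== Notes on version B (the rewrite author's own statement) =====
-- stated objective: alternative
-- what changed: B replaces A's layer table (collect all symbols per position, then classify every one of the 15 positions by J-membership/emptiness/distinct-count) with an online state machine that merges each signal directly into its cell in a single pass ('J' absorbing, differing symbol -> persistent conflict marker 'X'); idle station cells then retain the medium contents and the station letters are stamped last, as in A.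
import Mathlib
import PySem

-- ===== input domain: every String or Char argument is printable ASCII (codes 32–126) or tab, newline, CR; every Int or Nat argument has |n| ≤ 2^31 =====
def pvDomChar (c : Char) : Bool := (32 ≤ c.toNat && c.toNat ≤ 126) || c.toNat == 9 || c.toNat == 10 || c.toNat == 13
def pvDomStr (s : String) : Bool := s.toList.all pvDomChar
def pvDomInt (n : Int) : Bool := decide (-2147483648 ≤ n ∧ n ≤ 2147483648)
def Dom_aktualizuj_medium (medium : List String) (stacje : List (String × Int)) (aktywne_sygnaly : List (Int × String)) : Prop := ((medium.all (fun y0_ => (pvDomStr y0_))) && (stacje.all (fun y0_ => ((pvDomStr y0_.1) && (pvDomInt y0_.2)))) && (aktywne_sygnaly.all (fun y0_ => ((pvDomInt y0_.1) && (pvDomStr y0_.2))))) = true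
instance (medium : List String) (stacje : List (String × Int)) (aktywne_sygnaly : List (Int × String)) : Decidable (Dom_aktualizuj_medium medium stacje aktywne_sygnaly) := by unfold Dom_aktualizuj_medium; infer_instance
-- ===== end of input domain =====

-- B replaces A's per-position layer table and classification scan by a single-pass online
-- state machine merging each signal into its cell ('J' absorbing, conflict -> persistent 'X');
-- idle station cells retain the medium contents before the stamp, exactly as in A.

-- ===== PORT A =====
-- DLUGOSC = 15;  STACJE = {'A': 0, 'B': 7, 'C': 14}
def pvSTACJE : PySem.Dict String Int := PySem.Dict.ofList [("A", 0), ("B", 7), ("C", 14)]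

def aktualizuj_medium (medium : List String) (stacje : List (String × Int)) (aktywne_sygnaly : List (Int × String)) : List String :=
  let nowe : List String := List.replicate 15 "_"
  let warstwy : List (List String) := List.replicate 15 []
  -- for i, (pos, symbol) in enumerate(aktywne_sygnaly): warstwy[pos].append(symbol)
  let warstwy := aktywne_sygnaly.foldl
    (fun w ps => PySem.List.pySetD w ps.1 (PySem.List.pyGetD w ps.1 [] ++ [ps.2])) warstwy
  -- for i in range(DLUGOSC): …
  let nowe := (PySem.List.pyRange 0 15 1).foldl (fun nw i =>
    if "J" ∈ PySem.List.pyGetD warstwy i [] then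
      PySem.List.pySetD nw i "J"
    else if (PySem.List.pyGetD warstwy i []).length == 0 then
      PySem.List.pySetD nw i (if i ∉ pvSTACJE.values then "_" else PySem.List.pyGetD medium i "_")
    else if (PySem.Set.ofList (PySem.List.pyGetD warstwy i [])).length == 1 then
      PySem.List.pySetD nw i (PySem.List.pyGetD (PySem.List.pyGetD warstwy i []) 0 "_")
    else
      PySem.List.pySetD nw i "X") nowe
  -- for st in STACJE: nowe[STACJE[st]] = st
  let nowe := pvSTACJE.keys.foldl (fun nw st => PySem.List.pySetD nw (pvSTACJE.getD st 0) st) nowe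
  nowe

-- ===== PORT B =====
def aktualizuj_medium_alt (medium : List String) (stacje : List (String × Int)) (aktywne_sygnaly : List (Int × String)) : List String :=
  -- stan = [None] * DLUGOSC; for pos, sym in aktywne_sygnaly: <state-machine update>
  let stan : List (Option String) := List.replicate 15 none
  let stan := aktywne_sygnaly.foldl (fun st ps =>
    let s := PySem.List.pyGetD st ps.1 none
    if ps.2 == "J" || s == some "J" then PySem.List.pySetD st ps.1 (some "J")
    else if s == none || s == some ps.2 then PySem.List.pySetD st ps.1 (some ps.2)
    else PySem.List.pySetD st ps.1 (some "X")) stan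
  -- nowe = [s if s is not None else '_' for s in stan]
  let nowe : List String := stan.map (fun s => s.getD "_")
  -- for p in STACJE.values(): if stan[p] is None: nowe[p] = medium[p]
  let nowe := pvSTACJE.values.foldl (fun nw p =>
    if PySem.List.pyGetD stan p none == none then
      PySem.List.pySetD nw p (PySem.List.pyGetD medium p "_")
    else nw) nowe
  -- for st, p in STACJE.items(): nowe[p] = st
  pvSTACJE.items.foldl (fun nw st => PySem.List.pySetD nw st.2 st.1) nowe

-- ===== PRECONDITION & SPEC =====
-- Pre_ is exactly where the Python A returns: every signal position is a valid index into the
-- 15-slot layer table, and every station slot is either covered by a signal or indexable in medium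
-- (otherwise A raises IndexError).
def Pre_aktualizuj_medium (medium : List String) (stacje : List (String × Int)) (aktywne_sygnaly : List (Int × String)) : Prop :=
  (∀ ps ∈ aktywne_sygnaly, -15 ≤ ps.1 ∧ ps.1 < 15) ∧
  (∀ i ∈ ([0, 7, 14] : List Int), i < (medium.length : Int) ∨ ∃ ps ∈ aktywne_sygnaly, PySem.Int.mod ps.1 15 = i)
instance (medium : List String) (stacje : List (String × Int)) (aktywne_sygnaly : List (Int × String)) : Decidable (Pre_aktualizuj_medium medium stacje aktywne_sygnaly) := by unfold Pre_aktualizuj_medium; infer_instance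

def pvWitness_aktualizuj_medium : List String × (List (String × Int)) × (List (Int × String)) :=
  (["A", "_", "_", "_", "_", "_", "_", "B", "_", "_", "_", "_", "_", "_", "C"], [("A", 0)], [(3, "J"), (-2, "B")])

def Spec_aktualizuj_medium (medium : List String) (stacje : List (String × Int)) (aktywne_sygnaly : List (Int × String)) (out : List String) : Prop := out = aktualizuj_medium_alt medium stacje aktywne_sygnaly
instance (medium : List String) (stacje : List (String × Int)) (aktywne_sygnaly : List (Int × String)) (out : List String) : Decidable (Spec_aktualizuj_medium medium stacje aktywne_sygnaly out) := by unfold Spec_aktualizuj_medium; infer_instance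

-- ===== CLAIM (what is proved, stated in full; the proofs are below) =====
def Claim_equal_aktualizuj_medium : Prop := ∀ (medium : List String) (stacje : List (String × Int)) (aktywne_sygnaly : List (Int × String)), Dom_aktualizuj_medium medium stacje aktywne_sygnaly → Pre_aktualizuj_medium medium stacje aktywne_sygnaly → Spec_aktualizuj_medium medium stacje aktywne_sygnaly (aktualizuj_medium medium stacje aktywne_sygnaly)
-- ===== LEMMAS AND PROOFS =====

-- symbols arriving at normalized position c, in signal order
def pvSig (sigs : List (Int × String)) (c : Int) : List String :=
  (sigs.filter (fun ps => PySem.Int.mod ps.1 15 == c)).map (·.2)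

-- B's per-signal cell update, as a function of old state and incoming symbol
def pvStep (s : Option String) (y : String) : Option String :=
  if y == "J" || s == some "J" then some "J"
  else if s == none || s == some y then some y
  else some "X"

lemma pvIdx15 (p : Int) (h1 : -15 ≤ p) (h2 : p < 15) :
    PySem.List.pyIdx? 15 p = some (PySem.Int.mod p 15).toNat := by
  rw [PySem.Int.mod_eq_emod_of_pos (by norm_num)]
  simp only [PySem.List.pyIdx?]
  split_ifs with h3 h4 h5 <;> simp_all <;> omega

lemma pvSetMapRange {α : Type} (f : Nat → α) (p : Int) (h1 : -15 ≤ p) (h2 : p < 15) (v : α) :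
    PySem.List.pySetD ((List.range 15).map f) p v
      = (List.range 15).map (fun n : Nat => if (n : Int) = PySem.Int.mod p 15 then v else f n) := by
  have hm1 := PySem.Int.mod_nonneg p (b := 15) (by norm_num)
  have hm2 := PySem.Int.mod_lt p (b := 15) (by norm_num)
  simp only [PySem.List.pySetD, PySem.List.pySet?, List.length_map, List.length_range,
    pvIdx15 p h1 h2, Option.map_some, Option.getD_some]
  apply List.ext_getElem (by simp)
  intro n hn hn'
  simp only [List.getElem_set, List.getElem_map, List.getElem_range]
  split_ifs with ha hb hb
  · rfl
  · omega
  · omega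
  · rfl

lemma pvGetMapRange {α : Type} (f : Nat → α) (p : Int) (h1 : -15 ≤ p) (h2 : p < 15) (d : α) :
    PySem.List.pyGetD ((List.range 15).map f) p d = f (PySem.Int.mod p 15).toNat := by
  have hm1 := PySem.Int.mod_nonneg p (b := 15) (by norm_num)
  have hm2 := PySem.Int.mod_lt p (b := 15) (by norm_num)
  simp only [PySem.List.pyGetD, PySem.List.pyGet?, List.length_map, List.length_range,
    pvIdx15 p h1 h2, Option.bind_some]
  rw [List.getElem?_eq_getElem (by simp; omega)]
  simp

-- A's first loop builds the layer table: slot n holds pvSig at n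
lemma pvLayerLoop (sigs : List (Int × String)) (f : Nat → List String)
    (h : ∀ ps ∈ sigs, -15 ≤ ps.1 ∧ ps.1 < 15) :
    sigs.foldl (fun w ps => PySem.List.pySetD w ps.1 (PySem.List.pyGetD w ps.1 [] ++ [ps.2]))
      ((List.range 15).map f)
      = (List.range 15).map (fun n : Nat => f n ++ pvSig sigs (n : Int)) := by
  induction sigs generalizing f with
  | nil => simp [pvSig]
  | cons hd tl ih =>
    obtain ⟨hp1, hp2⟩ := h hd (by simp)
    simp only [List.foldl_cons]
    rw [pvGetMapRange f hd.1 hp1 hp2, pvSetMapRange f hd.1 hp1 hp2,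
        ih _ (fun ps hps => h ps (by simp [hps]))]
    apply List.map_congr_left
    intro n hn
    simp only [pvSig, List.filter_cons]
    by_cases hc : PySem.Int.mod hd.1 15 = (n : Int)
    · rw [hc]
      simp [List.append_assoc]
    · have hc' : ¬ hd.1 % 15 = (n : Int) := by
        rw [← PySem.Int.mod_eq_emod_of_pos (by norm_num : (0:Int) < 15)]; exact hc
      simp [hc']
      intro hcc
      exact absurd hcc.symm hc'

-- B's loop runs the state machine per cell: slot n holds the fold of pvSig at n
lemma pvStateLoop (sigs : List (Int × String)) (f : Nat → Option String)
    (h : ∀ ps ∈ sigs, -15 ≤ ps.1 ∧ ps.1 < 15) :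
    sigs.foldl (fun st ps => PySem.List.pySetD st ps.1 (pvStep (PySem.List.pyGetD st ps.1 none) ps.2))
      ((List.range 15).map f)
      = (List.range 15).map (fun n : Nat => (pvSig sigs (n : Int)).foldl pvStep (f n)) := by
  induction sigs generalizing f with
  | nil => simp [pvSig]
  | cons hd tl ih =>
    obtain ⟨hp1, hp2⟩ := h hd (by simp)
    simp only [List.foldl_cons]
    rw [pvGetMapRange f hd.1 hp1 hp2, pvSetMapRange f hd.1 hp1 hp2,
        ih _ (fun ps hps => h ps (by simp [hps]))]
    apply List.map_congr_left
    intro n hn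
    simp only [pvSig, List.filter_cons]
    by_cases hc : PySem.Int.mod hd.1 15 = (n : Int)
    · rw [hc]
      simp
    · have hc' : ¬ hd.1 % 15 = (n : Int) := by
        rw [← PySem.Int.mod_eq_emod_of_pos (by norm_num : (0:Int) < 15)]; exact hc
      have hc'' : ¬ (n : Int) = hd.1 % 15 := fun he => hc' he.symm
      simp [hc', hc'']

-- scatter loop: writing value v k at each distinct in-range position k
lemma pvScatter (K : List Int) (hK : ∀ k ∈ K, 0 ≤ k ∧ k < 15)
    (v : Int → String) (g : Nat → String) :
    K.foldl (fun nw k => PySem.List.pySetD nw k (v k)) ((List.range 15).map g)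
      = (List.range 15).map (fun n : Nat => if (n : Int) ∈ K then v (n : Int) else g n) := by
  induction K generalizing g with
  | nil => simp
  | cons k K' ih =>
    obtain ⟨hk1, hk2⟩ := hK k (by simp)
    simp only [List.foldl_cons]
    rw [pvSetMapRange g k (by omega) hk2 (v k)]
    have hmod : PySem.Int.mod k 15 = k := by
      rw [PySem.Int.mod_eq_emod_of_pos (by norm_num)]; omega
    rw [hmod, ih (fun j hj => hK j (by simp [hj]))]
    apply List.map_congr_left
    intro n hn
    by_cases h1 : (n : Int) ∈ K'
    · simp [h1]
    · by_cases h2 : (n : Int) = k <;> simp [h1, h2]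

-- closed form of the machine from a non-None state
lemma pvFold_some (t : List String) (s : String) :
    t.foldl pvStep (some s)
      = some (if "J" ∈ t ∨ s = "J" then "J"
              else if s = "X" ∨ (∃ y ∈ t, y ≠ s) then "X" else s) := by
  induction t generalizing s with
  | nil =>
    simp
    split_ifs with h1 h2
    · exact h1
    · exact h2
    · rfl
  | cons h t ih =>
    simp only [List.foldl_cons]
    by_cases hJ : h = "J"
    · subst hJ
      rw [show pvStep (some s) "J" = some "J" from by simp [pvStep], ih]
      simp
    · have h1 : ¬ ("J" = h) := fun e => hJ e.symm
      by_cases hsJ : s = "J"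
      · subst hsJ
        rw [show pvStep (some "J") h = some "J" from by simp [pvStep], ih]
        simp [h1]
      · by_cases hhs : h = s
        · subst hhs
          rw [show pvStep (some h) h = some h from by simp [pvStep, hJ], ih]
          simp [hJ, hsJ, h1]
        · have hsh : ¬ s = h := fun e => hhs e.symm
          rw [show pvStep (some s) h = some "X" from by simp [pvStep, hJ, hsJ, hsh], ih]
          have hex : ∃ y ∈ h :: t, y ≠ s := ⟨h, by simp, hhs⟩
          by_cases hJt : "J" ∈ t
          · simp [hJt]
          · simp [hJt, hJ, hsJ, h1, hex]
            intro _ he _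
            exact absurd he hhs

-- a nodup set with one distinguished member h: length 1 iff every other element equals h
lemma pvSetOne (h : String) (t : List String) :
    (PySem.Set.ofList (h :: t)).length = 1 ↔ ∀ y ∈ t, y = h := by
  constructor
  · intro hl y hy
    obtain ⟨a, ha⟩ := List.length_eq_one_iff.mp hl
    have hyS : y ∈ PySem.Set.ofList (h :: t) := by
      rw [PySem.Set.mem_ofList]; simp [hy]
    have hhS : h ∈ PySem.Set.ofList (h :: t) := by
      rw [PySem.Set.mem_ofList]; simp
    rw [ha] at hyS hhS
    simp only [List.mem_singleton] at hyS hhS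
    rw [hyS, hhS]
  · intro hall
    have hmem : ∀ x, x ∈ PySem.Set.ofList (h :: t) ↔ x = h := by
      intro x
      rw [PySem.Set.mem_ofList]
      constructor
      · intro hx
        rcases List.mem_cons.mp hx with rfl | hx
        · rfl
        · exact hall x hx
      · rintro rfl; simp
    have hnd := PySem.Set.nodup_ofList (h :: t)
    rcases hS : PySem.Set.ofList (h :: t) with _ | ⟨a, _ | ⟨b, r⟩⟩
    · exact absurd (hS ▸ (hmem h).mpr rfl) (List.not_mem_nil)
    · rfl
    · exfalso
      have ha : a = h := (hmem a).mp (by rw [hS]; simp)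
      have hb : b = h := (hmem b).mp (by rw [hS]; simp)
      rw [hS, ha, hb] at hnd
      simp at hnd

-- final per-cell value of B's machine equals A's classification of the same symbol list
lemma pvCell (l : List String) :
    (l.foldl pvStep none).getD "_"
      = if "J" ∈ l then "J"
        else if l.length == 0 then "_"
        else if (PySem.Set.ofList l).length == 1 then PySem.List.pyGetD l 0 "_"
        else "X" := by
  cases l with
  | nil => simp
  | cons h t =>
    have hstart : pvStep none h = some h := by
      by_cases hJ : h = "J"
      · subst hJ; simp [pvStep]
      · simp [pvStep, hJ]
    rw [List.foldl_cons, hstart, pvFold_some]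
    have hget : PySem.List.pyGetD (h :: t) 0 "_" = h := PySem.List.pyGetD_zero_cons h t "_"
    have hlen : ((h :: t).length == 0) = false := by simp
    simp only [Option.getD_some, hget, hlen, Bool.false_eq_true, if_false]
    by_cases hJ : "J" ∈ h :: t
    · have hor : "J" ∈ t ∨ h = "J" := by
        rcases List.mem_cons.mp hJ with e | e
        · exact Or.inr e.symm
        · exact Or.inl e
      simp [hJ, hor]
    · have hJt : "J" ∉ t := fun m => hJ (List.mem_cons_of_mem _ m)
      have hJh : ¬ h = "J" := fun e => hJ (by simp [e])
      rw [if_neg (by tauto : ¬ ("J" ∈ t ∨ h = "J")), if_neg hJ]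
      by_cases hall : ∀ y ∈ t, y = h
      · have hs1 : ((PySem.Set.ofList (h :: t)).length == 1) = true := by
          rw [beq_iff_eq, pvSetOne]; exact hall
        have hnoex : ¬ ∃ y ∈ t, y ≠ h := by
          rintro ⟨y, hy, hne⟩; exact hne (hall y hy)
        simp only [hs1, if_true]
        by_cases hX : h = "X"
        · simp [hX]
        · rw [if_neg (by tauto : ¬ (h = "X" ∨ ∃ y ∈ t, y ≠ h))]
      · have hex : ∃ y ∈ t, y ≠ h := by
          push_neg at hall; exact hall
        have hs1 : ((PySem.Set.ofList (h :: t)).length == 1) = false := by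
          rw [beq_eq_false_iff_ne]
          intro heq
          exact absurd ((pvSetOne h t).mp heq) (by push_neg; exact hex)
        simp only [hs1, Bool.false_eq_true, if_false]
        rw [if_pos (Or.inr hex)]

-- a fold of conditional in-range writes keeps the map-over-range shape and touches only positions in L
lemma pvPreserveOutside (L : List Int) (hL : ∀ k ∈ L, 0 ≤ k ∧ k < 15)
    (c : Int → Bool) (m : Int → String) (g : Nat → String) :
    ∃ g' : Nat → String,
      L.foldl (fun nw p => if c p then PySem.List.pySetD nw p (m p) else nw) ((List.range 15).map g)
        = (List.range 15).map g' ∧ ∀ n : Nat, (n : Int) ∉ L → g' n = g n := by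
  induction L generalizing g with
  | nil => exact ⟨g, rfl, fun _ _ => rfl⟩
  | cons k L' ih =>
    obtain ⟨hk1, hk2⟩ := hL k (by simp)
    have hmod : PySem.Int.mod k 15 = k := by
      rw [PySem.Int.mod_eq_emod_of_pos (by norm_num : (0:Int) < 15)]; omega
    simp only [List.foldl_cons]
    by_cases hc : c k = true
    · rw [if_pos hc, pvSetMapRange g k (by omega) hk2 (m k), hmod]
      obtain ⟨g', h1, h2⟩ := ih (fun j hj => hL j (by simp [hj]))
        (fun n : Nat => if (n : Int) = k then m k else g n)
      refine ⟨g', h1, fun n hn => ?_⟩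
      rw [h2 n (fun hmem => hn (by simp [hmem]))]
      exact if_neg (fun he => hn (by simp [he]))
    · rw [if_neg hc]
      obtain ⟨g', h1, h2⟩ := ih (fun j hj => hL j (by simp [hj])) g
      exact ⟨g', h1, fun n hn => h2 n (fun hmem => hn (by simp [hmem]))⟩

theorem aktualizuj_medium_spec_aux (medium : List String) (stacje : List (String × Int))
    (sigs : List (Int × String)) (hpre : Pre_aktualizuj_medium medium stacje sigs) :
    aktualizuj_medium medium stacje sigs = aktualizuj_medium_alt medium stacje sigs := by
  obtain ⟨hp, _⟩ := hpre
  have hrep : (List.replicate 15 ([] : List String)) = (List.range 15).map (fun _ => ([] : List String)) := rfl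
  have hrep2 : (List.replicate 15 "_") = (List.range 15).map (fun _ => "_") := rfl
  have hrepO : (List.replicate 15 (none : Option String)) = (List.range 15).map (fun _ => (none : Option String)) := rfl
  have hpr : PySem.List.pyRange 0 15 1 = ([0,1,2,3,4,5,6,7,8,9,10,11,12,13,14] : List Int) := rfl
  have hstamp : ∀ g : Nat → String,
      PySem.List.pySetD (PySem.List.pySetD (PySem.List.pySetD ((List.range 15).map g) 0 "A") 7 "B") 14 "C"
        = (List.range 15).map (fun n : Nat => if (n : Int) = 14 then "C" else if (n : Int) = 7 then "B" else if (n : Int) = 0 then "A" else g n) := by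
    intro g
    rw [pvSetMapRange g 0 (by norm_num) (by norm_num),
        pvSetMapRange _ 7 (by norm_num) (by norm_num),
        pvSetMapRange _ 14 (by norm_num) (by norm_num),
        show PySem.Int.mod 0 15 = 0 from by decide,
        show PySem.Int.mod 7 15 = 7 from by decide,
        show PySem.Int.mod 14 15 = 14 from by decide]
  -- A side
  have hA : aktualizuj_medium medium stacje sigs
      = (List.range 15).map (fun n : Nat => if (n : Int) = 14 then "C" else if (n : Int) = 7 then "B" else if (n : Int) = 0 then "A" else
          (if (n : Int) ∈ ([0,1,2,3,4,5,6,7,8,9,10,11,12,13,14] : List Int) then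
            (fun i : Int =>
              let wi := PySem.List.pyGetD ((List.range 15).map (fun m : Nat => pvSig sigs (m : Int))) i []
              if "J" ∈ wi then "J"
              else if wi.length == 0 then (if i ∉ pvSTACJE.values then "_" else PySem.List.pyGetD medium i "_")
              else if (PySem.Set.ofList wi).length == 1 then PySem.List.pyGetD wi 0 "_"
              else "X") (n : Int)
          else "_")) := by
    simp only [aktualizuj_medium]
    rw [hrep, pvLayerLoop sigs _ hp]
    simp only [List.nil_append]
    rw [hpr, hrep2]
    have hbody : (fun (nw : List String) (i : Int) =>
        if "J" ∈ PySem.List.pyGetD ((List.range 15).map (fun m : Nat => pvSig sigs (m : Int))) i [] then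
          PySem.List.pySetD nw i "J"
        else if (PySem.List.pyGetD ((List.range 15).map (fun m : Nat => pvSig sigs (m : Int))) i []).length == 0 then
          PySem.List.pySetD nw i (if i ∉ pvSTACJE.values then "_" else PySem.List.pyGetD medium i "_")
        else if (PySem.Set.ofList (PySem.List.pyGetD ((List.range 15).map (fun m : Nat => pvSig sigs (m : Int))) i [])).length == 1 then
          PySem.List.pySetD nw i (PySem.List.pyGetD (PySem.List.pyGetD ((List.range 15).map (fun m : Nat => pvSig sigs (m : Int))) i []) 0 "_")
        else PySem.List.pySetD nw i "X")
        = (fun (nw : List String) (i : Int) => PySem.List.pySetD nw i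
            ((fun i : Int =>
              let wi := PySem.List.pyGetD ((List.range 15).map (fun m : Nat => pvSig sigs (m : Int))) i []
              if "J" ∈ wi then "J"
              else if wi.length == 0 then (if i ∉ pvSTACJE.values then "_" else PySem.List.pyGetD medium i "_")
              else if (PySem.Set.ofList wi).length == 1 then PySem.List.pyGetD wi 0 "_"
              else "X") i)) := by
      funext nw i
      simp only []
      split_ifs <;> rfl
    rw [hbody, pvScatter ([0,1,2,3,4,5,6,7,8,9,10,11,12,13,14] : List Int) (by decide) _ (fun _ => "_")]
    have hkeys : pvSTACJE.keys = ["A", "B", "C"] := rfl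
    rw [hkeys]
    simp only [List.foldl_cons, List.foldl_nil,
      show pvSTACJE.getD "A" 0 = 0 from rfl, show pvSTACJE.getD "B" 0 = 7 from rfl,
      show pvSTACJE.getD "C" 0 = 14 from rfl]
    rw [hstamp]
  -- B side
  obtain ⟨g', hg', hgout⟩ := pvPreserveOutside ([0, 7, 14] : List Int) (by decide)
    (fun p => PySem.List.pyGetD ((List.range 15).map (fun n : Nat => (pvSig sigs (n : Int)).foldl pvStep none)) p none == none)
    (fun p => PySem.List.pyGetD medium p "_")
    (fun n : Nat => ((pvSig sigs (n : Int)).foldl pvStep none).getD "_")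
  have hB : aktualizuj_medium_alt medium stacje sigs
      = (List.range 15).map (fun n : Nat => if (n : Int) = 14 then "C" else if (n : Int) = 7 then "B" else if (n : Int) = 0 then "A" else g' n) := by
    simp only [aktualizuj_medium_alt]
    have hbody : (fun (st : List (Option String)) (ps : Int × String) =>
        if ps.2 == "J" || PySem.List.pyGetD st ps.1 none == some "J" then PySem.List.pySetD st ps.1 (some "J")
        else if PySem.List.pyGetD st ps.1 none == none || PySem.List.pyGetD st ps.1 none == some ps.2 then PySem.List.pySetD st ps.1 (some ps.2)
        else PySem.List.pySetD st ps.1 (some "X"))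
        = (fun (st : List (Option String)) (ps : Int × String) =>
            PySem.List.pySetD st ps.1 (pvStep (PySem.List.pyGetD st ps.1 none) ps.2)) := by
      funext st ps
      simp only [pvStep]
      split_ifs <;> rfl
    rw [hrepO, hbody, pvStateLoop sigs _ hp]
    have hmm : ((List.range 15).map (fun n : Nat => (pvSig sigs (n : Int)).foldl pvStep none)).map (fun s => s.getD "_")
        = (List.range 15).map (fun n : Nat => ((pvSig sigs (n : Int)).foldl pvStep none).getD "_") := by
      rw [List.map_map]; rfl
    have hvals : pvSTACJE.values = ([0, 7, 14] : List Int) := rfl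
    rw [hmm, hvals, hg']
    have hstB : ∀ nw : List String, pvSTACJE.items.foldl (fun nw st => PySem.List.pySetD nw st.2 st.1) nw
        = PySem.List.pySetD (PySem.List.pySetD (PySem.List.pySetD nw 0 "A") 7 "B") 14 "C" := fun _ => rfl
    rw [hstB, hstamp]
  rw [hA, hB]
  apply List.map_congr_left
  intro n hn
  have hn15 : n < 15 := List.mem_range.mp hn
  by_cases h14 : (n : Int) = 14
  · simp [h14]
  by_cases h7 : (n : Int) = 7
  · simp [h7]
  by_cases h0 : (n : Int) = 0
  · simp [h0]
  simp only [if_neg h14, if_neg h7, if_neg h0]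
  have hmemA : (n : Int) ∈ ([0,1,2,3,4,5,6,7,8,9,10,11,12,13,14] : List Int) := by
    simp only [List.mem_cons, List.not_mem_nil, or_false]
    omega
  rw [if_pos hmemA]
  have hmod : PySem.Int.mod (n : Int) 15 = (n : Int) := by
    rw [PySem.Int.mod_eq_emod_of_pos (by norm_num : (0:Int) < 15)]
    omega
  have hwi : PySem.List.pyGetD ((List.range 15).map (fun m : Nat => pvSig sigs (m : Int))) (n : Int) []
      = pvSig sigs (n : Int) := by
    rw [pvGetMapRange _ _ (by omega) (by exact_mod_cast hn15), hmod]
    simp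
  simp only [hwi]
  have hstation : ((n : Int) ∉ pvSTACJE.values) := by
    show (n : Int) ∉ [(0 : Int), 7, 14]
    simp only [List.mem_cons, List.not_mem_nil, or_false]
    exact fun hmem => hmem.elim h0 (fun h' => h'.elim h7 h14)
  rw [hgout n (by
    simp only [List.mem_cons, List.not_mem_nil, or_false]
    exact fun hmem => hmem.elim h0 (fun h' => h'.elim h7 h14))]
  rw [pvCell (pvSig sigs (n : Int))]
  simp only [hstation, not_false_iff, if_true]

-- ===== VERDICT (by name: the statements are the Claim_ definitions above) =====
theorem aktualizuj_medium_spec : Claim_equal_aktualizuj_medium := by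
  intro medium stacje sigs _ hpre
  exact aktualizuj_medium_spec_aux medium stacje sigs hpre
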